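-- pv_equiv track=rewrite | github.com/netml/autoic | libraries.py | generate_specific_combinations
-- ===== SOURCE A (Python) =====
-- def generate_specific_combinations(n):
--     combinations = []
--     for i in range(1, n + 1):
--         combination = [j for j in range(1, n + 1) if j != i]
--         combination.sort()
--         combination.append(i)
--         combinations.append(combination)
--     return combinations
-- ===== SOURCE B (Python) =====
-- def generate_specific_combinations(n):
--     if n <= 0:
--         return []
--     row = list(range(2, n + 1)) + [1]
--     result = [row[:]]
--     for i in range(1, n):
--         row[i - 1], row[n - 1] = row[n - 1], row[i - 1]
--         result.append(row[:])
--     return result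
-- ===== Notes on version B (the rewrite author's own statement) =====
-- stated objective: alternative
-- what changed: Instead of building every row from scratch with a filtering comprehension and a sort, B maintains one mutable row (starting at [2..n,1]) and derives each next row from the previous by a single swap of positions i-1 and n-1, appending a snapshot copy each iteration.
import Mathlib
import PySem

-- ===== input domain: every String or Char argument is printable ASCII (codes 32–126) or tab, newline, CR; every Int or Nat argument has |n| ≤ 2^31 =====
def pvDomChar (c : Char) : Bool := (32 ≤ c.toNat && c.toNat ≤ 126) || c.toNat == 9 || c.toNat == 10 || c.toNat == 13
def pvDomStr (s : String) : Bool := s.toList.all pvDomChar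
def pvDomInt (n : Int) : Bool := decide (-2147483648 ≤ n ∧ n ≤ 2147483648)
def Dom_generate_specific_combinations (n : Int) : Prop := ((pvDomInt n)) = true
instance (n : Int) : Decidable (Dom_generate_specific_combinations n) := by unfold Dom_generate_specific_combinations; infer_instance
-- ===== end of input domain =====

-- B replaces A's per-row filter+sort construction by an incremental algorithm:
-- one mutable row, each next row obtained from the previous by a single swap,
-- snapshotted each iteration (objective: alternative).

-- ===== PORT A =====
def generate_specific_combinations (n : Int) : List (List Int) :=
  (PySem.List.pyRange 1 (n + 1) 1).foldl
    (fun combinations i =>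
      let combination := (PySem.List.pyRange 1 (n + 1) 1).filter (fun j => j ≠ i)
      let combination := PySem.List.sorted combination (fun x => x) false
      let combination := combination ++ [i]
      combinations ++ [combination]) []

-- ===== PORT B =====
-- Python's tuple-swap assignment 'row[i-1], row[n-1] = row[n-1], row[i-1]' is ported by
-- hand as two reads (PySem.List.pyGetD; indices i-1, n-1 are nonnegative and in range on
-- every loop iteration, so this is exact) followed by two List.set writes.
-- the loop body: read row[i-1] and row[n-1], write them back swapped, snapshot
def pvStep (n : Int) (st : List Int × List (List Int)) (i : Int) : List Int × List (List Int) :=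
  let a := PySem.List.pyGetD st.1 (i - 1) 0
  let b := PySem.List.pyGetD st.1 (n - 1) 0
  let row := (st.1.set (i - 1).toNat b).set (n - 1).toNat a
  (row, st.2 ++ [row])

def generate_specific_combinations_alt (n : Int) : List (List Int) :=
  if n ≤ 0 then []
  else
    let row0 := PySem.List.pyRange 2 (n + 1) 1 ++ [1]
    ((PySem.List.pyRange 1 n 1).foldl (pvStep n) (row0, [row0])).2

-- ===== PRECONDITION & SPEC =====
def Spec_generate_specific_combinations (n : Int) (out : List (List Int)) : Prop := out = generate_specific_combinations_alt n
instance (n : Int) (out : List (List Int)) : Decidable (Spec_generate_specific_combinations n out) := by unfold Spec_generate_specific_combinations; infer_instance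

-- ===== CLAIM (what is proved, stated in full; the proofs are below) =====
def Claim_equal_generate_specific_combinations : Prop := ∀ (n : Int), Dom_generate_specific_combinations n → Spec_generate_specific_combinations n (generate_specific_combinations n)

-- ===== LEMMAS AND PROOFS =====

-- the common normal form: row for 0-based index j is full[:j] ++ full[j+1:] ++ [j+1]
def pvFull (n : Int) : List Int := PySem.List.pyRange 1 (n + 1) 1
def pvRow (n : Int) (j : Nat) : List Int :=
  (pvFull n).take j ++ (pvFull n).drop (j + 1) ++ [1 + (j : Int)]

lemma pvFull_length (n : Int) : (pvFull n).length = (n : Int).toNat := by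
  simp [pvFull, PySem.List.length_pyRange_one]

-- the strictly increasing list l1 ++ a :: l2 filters (· ≠ a) to l1 ++ l2
lemma filter_ne_of_pairwise_lt (l1 l2 : List Int) (a : Int)
    (h : (l1 ++ a :: l2).Pairwise (· < ·)) :
    (l1 ++ a :: l2).filter (fun j => j ≠ a) = l1 ++ l2 := by
  rw [List.pairwise_append] at h
  obtain ⟨h1, h2, h3⟩ := h
  rw [List.filter_append]
  have e1 : l1.filter (fun j => j ≠ a) = l1 := by
    apply List.filter_eq_self.2
    intro x hx
    have := h3 x hx a (List.mem_cons_self)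
    simp
    omega
  have e2 : (a :: l2).filter (fun j => j ≠ a) = l2 := by
    rw [List.filter_cons]
    simp
    intro x hx
    have := (List.pairwise_cons.1 h2).1 x hx
    omega
  rw [e1, e2]

-- A's row for i = 1+k is pvRow n k
lemma a_row_eq (n : Int) (k : Nat) (hk : k < (pvFull n).length) :
    PySem.List.sorted ((pvFull n).filter (fun j => j ≠ 1 + (k : Int))) (fun x => x) false
      ++ [1 + (k : Int)] = pvRow n k := by
  set full := pvFull n with hfull
  have hsplit : full = full.take k ++ full[k] :: full.drop (k + 1) := by
    conv_lhs => rw [← List.take_append_drop k full, List.drop_eq_getElem_cons hk]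
  have hget : full[k] = 1 + (k : Int) := PySem.List.getElem_pyRange_one 1 (n + 1) k hk
  have hpw : full.Pairwise (· < ·) := PySem.List.pairwise_lt_pyRange_one 1 (n + 1)
  have hpw' : (full.take k ++ full[k] :: full.drop (k + 1)).Pairwise (· < ·) := by
    rw [← hsplit]; exact hpw
  have hfilter : full.filter (fun j => j ≠ 1 + (k : Int)) = full.take k ++ full.drop (k + 1) := by
    conv_lhs => rw [hsplit, hget]
    rw [← hget]
    exact filter_ne_of_pairwise_lt _ _ _ hpw'
  have hsortedarg : (full.filter (fun j => j ≠ 1 + (k : Int))).Pairwise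
      (fun a b => (fun x => x) a ≤ (fun x => x) b) :=
    (List.Pairwise.filter _ hpw).imp (fun h => le_of_lt h)
  rw [PySem.List.sorted_eq_self_of_pairwise _ _ hsortedarg, hfilter, pvRow]

-- A equals the map of pvRow over 0-based indices
lemma a_eq_map (n : Int) :
    generate_specific_combinations n = (List.range (n : Int).toNat).map (pvRow n) := by
  unfold generate_specific_combinations
  rw [PySem.List.foldl_append_singleton_eq_map]
  apply List.ext_getElem
  · simp [PySem.List.length_pyRange_one]
  · intro k h1 h2
    have hk : k < (pvFull n).length := by
      simpa [pvFull, PySem.List.length_pyRange_one] using h1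
    simp only [List.nil_append, List.getElem_map, List.getElem_range]
    simp only [PySem.List.getElem_pyRange_one]
    exact a_row_eq n k hk

-- the swap step: from pvRow n m with i = 1 + m it produces pvRow n (m+1)
lemma swap_step (n : Int) (m : Nat) (hm : m + 1 < (n : Int).toNat) :
    pvStep n (pvRow n m, (List.range (m + 1)).map (pvRow n)) (1 + (m : Int)) =
      (pvRow n (m + 1), (List.range (m + 2)).map (pvRow n)) := by
  have hlenfull : (pvFull n).length = (n : Int).toNat := pvFull_length n
  have hm' : m < (pvFull n).length := by omega
  have hm1 : m + 1 < (pvFull n).length := by omega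
  have htake : ((pvFull n).take m).length = m := by rw [List.length_take]; omega
  have hdrop : (pvFull n).drop (m + 1) = (pvFull n)[m + 1] :: (pvFull n).drop (m + 2) :=
    List.drop_eq_getElem_cons hm1
  have hget1 : (pvFull n)[m + 1] = 1 + ((m : Int) + 1) := by
    have h := PySem.List.getElem_pyRange_one 1 (n + 1) (m + 1) hm1
    rw [show ((1 : Int) + ((m + 1 : Nat) : Int)) = 1 + ((m : Int) + 1) by push_cast; ring] at h
    exact h
  have hrowlen : (pvRow n m).length = (n : Int).toNat := by
    simp [pvRow, List.length_take, List.length_drop, hlenfull]; omega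
  have hidx1 : ((1 + (m : Int)) - 1) = ((m : Nat) : Int) := by omega
  have hreadA : PySem.List.pyGetD (pvRow n m) ((1 + (m : Int)) - 1) 0 = 1 + ((m : Int) + 1) := by
    rw [hidx1, PySem.List.pyGetD_natCast, List.getD_eq_getElem?_getD]
    simp only [pvRow, hdrop, hget1]
    rw [List.getElem?_append_left (by simp [htake]),
        List.getElem?_append_right htake.le, htake]
    simp
  have hn1 : (n - 1) = ((((n : Int).toNat - 1 : Nat)) : Int) := by omega
  have hreadB : PySem.List.pyGetD (pvRow n m) (n - 1) 0 = 1 + (m : Int) := by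
    have hl12 : ((pvFull n).take m ++ (pvFull n).drop (m + 1)).length = (n : Int).toNat - 1 := by
      simp [List.length_take, List.length_drop, hlenfull]; omega
    rw [hn1, PySem.List.pyGetD_natCast, List.getD_eq_getElem?_getD]
    simp only [pvRow]
    rw [List.getElem?_append_right hl12.le, hl12]
    simp
  unfold pvStep
  rw [hreadA, hreadB]
  have hset1 : (pvRow n m).set ((1 + (m : Int)) - 1).toNat (1 + (m : Int)) =
      (pvFull n).take (m + 1) ++ (pvFull n).drop (m + 2) ++ [1 + (m : Int)] := by
    have hto : ((1 + (m : Int)) - 1).toNat = m := by omega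
    rw [hto]
    simp only [pvRow, hdrop]
    rw [List.set_append, if_pos (by simp [htake]; omega)]
    rw [List.set_append, if_neg (by omega), htake]
    simp only [Nat.sub_self, List.set_cons_zero]
    have hgetm : (pvFull n)[m] = 1 + (m : Int) :=
      PySem.List.getElem_pyRange_one 1 (n + 1) m hm'
    rw [List.take_add_one, List.getElem?_eq_getElem hm', hgetm]
    simp
  have hrow : ((pvRow n m).set ((1 + (m : Int)) - 1).toNat (1 + (m : Int))).set
      (n - 1).toNat (1 + ((m : Int) + 1)) = pvRow n (m + 1) := by
    rw [hset1]
    have hlen2 : ((pvFull n).take (m + 1) ++ (pvFull n).drop (m + 2)).length =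
        (n : Int).toNat - 1 := by
      simp [List.length_take, List.length_drop, hlenfull]; omega
    have hto : (n - 1).toNat = (n : Int).toNat - 1 := by omega
    rw [hto, List.set_append, if_neg (by omega), hlen2]
    simp only [Nat.sub_self, List.set_cons_zero, pvRow]
    rw [show (1 + ((m : Int) + 1)) = (1 + ((m + 1 : Nat) : Int)) by push_cast; ring]
  simp only [hrow]
  congr 1
  rw [List.range_succ (n := m + 1), List.map_append]
  simp

-- the fold invariant: after consuming range(1, 1+m) the state is (pvRow n m, rows 0..m)
lemma fold_inv (n : Int) (m : Nat) (hm : m < (n : Int).toNat) :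
    (PySem.List.pyRange 1 (1 + (m : Int)) 1).foldl (pvStep n) (pvRow n 0, [pvRow n 0]) =
      (pvRow n m, (List.range (m + 1)).map (pvRow n)) := by
  induction m with
  | zero => simp [PySem.List.pyRange_one_eq_nil, List.range_one]
  | succ k ih =>
    have hk : k < (n : Int).toNat := by omega
    have hsplit : PySem.List.pyRange 1 (1 + ((k + 1 : Nat) : Int)) 1 =
        PySem.List.pyRange 1 (1 + (k : Int)) 1 ++ [1 + (k : Int)] := by
      have h : (1 + ((k + 1 : Nat) : Int)) = (1 + (k : Int)) + 1 := by omega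
      rw [h, PySem.List.pyRange_one_succ_right (by omega)]
    rw [hsplit, List.foldl_append, ih hk]
    simp only [List.foldl_cons, List.foldl_nil]
    exact swap_step n k (by omega)

-- ===== VERDICT (by name: the statement is the Claim_ definition above) =====
theorem generate_specific_combinations_spec : Claim_equal_generate_specific_combinations := by
  intro n _
  unfold Spec_generate_specific_combinations generate_specific_combinations_alt
  rw [a_eq_map]
  by_cases hn : n ≤ 0
  · simp [hn, show (n : Int).toNat = 0 by omega]
  · rw [if_neg hn]
    have hpos : 0 < (n : Int).toNat := by omega
    have hrow0 : PySem.List.pyRange 2 (n + 1) 1 ++ [1] = pvRow n 0 := by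
      rw [pvRow]
      have h : pvFull n = 1 :: PySem.List.pyRange 2 (n + 1) 1 := by
        rw [pvFull, PySem.List.pyRange_one_cons (by omega)]
        norm_num
      simp [h]
    have hbound : PySem.List.pyRange 1 n 1 =
        PySem.List.pyRange 1 (1 + (((n : Int).toNat - 1 : Nat) : Int)) 1 := by
      congr 1
      omega
    rw [hrow0]
    show List.map (pvRow n) (List.range (n : Int).toNat) =
      (List.foldl (pvStep n) (pvRow n 0, [pvRow n 0]) (PySem.List.pyRange 1 n 1)).2
    rw [hbound, fold_inv n ((n : Int).toNat - 1) (by omega)]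
    rw [show (n : Int).toNat - 1 + 1 = (n : Int).toNat by omega]
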